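-- pv_equiv track=rewrite | github.com/alexcole123/PythonFibonacci | app.py | gen_fibonacci
-- ===== SOURCE A (Python) =====
-- def gen_fibonacci(limit):
--     first = 1
--     second = 1
--     yield ":)"
--     yield ":)"
--     next = first + second
--
--     while next <= limit:
--         yield ":("
--         first = second
--         second = next
--         next = first + second
-- ===== SOURCE B (Python) =====
-- def gen_fibonacci(limit):
--     # First materialize all Fibonacci numbers <= limit, then emit markers.
--     fibs = []
--     a, b = 1, 1
--     while a <= limit:
--         fibs.append(a)
--         a, b = b, a + b
--     yield ":)"
--     yield ":)"
--     for _ in fibs[2:]: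
--         yield ":("
-- ===== Notes on version B (the rewrite author's own statement) =====
-- stated objective: alternative
-- what changed: B first materializes the list of Fibonacci numbers <= limit in one loop, then emits the two ':)' unconditionally and one ':(' per Fibonacci number beyond the first two, instead of interleaving the recurrence with the yields inside a guarded while-loop.
import Mathlib
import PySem

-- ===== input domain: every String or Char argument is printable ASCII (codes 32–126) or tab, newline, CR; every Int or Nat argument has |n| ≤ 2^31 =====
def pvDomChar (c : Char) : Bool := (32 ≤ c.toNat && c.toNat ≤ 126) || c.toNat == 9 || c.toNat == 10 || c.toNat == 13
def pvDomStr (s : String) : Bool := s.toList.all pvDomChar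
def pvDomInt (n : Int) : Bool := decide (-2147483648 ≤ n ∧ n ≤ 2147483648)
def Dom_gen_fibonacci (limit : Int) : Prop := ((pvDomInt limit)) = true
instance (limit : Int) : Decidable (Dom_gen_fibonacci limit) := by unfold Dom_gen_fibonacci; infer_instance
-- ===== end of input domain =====

-- B materializes the Fibonacci numbers <= limit into a list first, then emits the
-- markers in a separate pass (same values as A; purely a different decomposition).

-- ===== PORT A =====
-- A's while-loop: state (first, second, next); yields ":(" while next <= limit.
-- The proofs 0 < second, 0 < next are invariants of A's loop (first=second=1 initially),
-- carried only for termination.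
def gen_fibonacci_loopA (first second next limit : Int)
    (hs : 0 < second) (hn : 0 < next) : List String :=
  if h : next ≤ limit then
    ":(" :: gen_fibonacci_loopA second next (second + next) limit hn (by omega)
  else
    []
termination_by (limit + 1 - next).toNat
decreasing_by omega

def gen_fibonacci (limit : Int) : List String :=
  -- first = 1; second = 1; yield ":)"; yield ":)"; next = first + second; while …
  ":)" :: ":)" :: gen_fibonacci_loopA 1 1 (1 + 1) limit (by omega) (by omega)

-- ===== PORT B =====
-- B's first loop: fibs = []; a, b = 1, 1; while a <= limit: fibs.append(a); a, b = b, a+b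
-- Invariants 0 < a, a ≤ b carried for termination only.
def gen_fibonacci_fibs (a b limit : Int) (ha : 0 < a) (hab : a ≤ b) : List Int :=
  if h : a ≤ limit then
    a :: gen_fibonacci_fibs b (a + b) limit (by omega) (by omega)
  else
    []
termination_by ((limit + 1 - a).toNat + (limit + 1 - b).toNat)
decreasing_by omega

def gen_fibonacci_alt (limit : Int) : List String :=
  -- yield ":)"; yield ":)"; for _ in fibs[2:]: yield ":("   (fibs[2:] = drop 2)
  ":)" :: ":)" ::
    ((gen_fibonacci_fibs 1 1 limit (by omega) (by omega)).drop 2).map (fun _ => ":(")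

-- ===== PRECONDITION & SPEC =====
def Spec_gen_fibonacci (limit : Int) (out : List String) : Prop := out = gen_fibonacci_alt limit
instance (limit : Int) (out : List String) : Decidable (Spec_gen_fibonacci limit out) := by unfold Spec_gen_fibonacci; infer_instance

-- ===== CLAIM (what is proved, stated in full; the proofs are below) =====
def Claim_equal_gen_fibonacci : Prop := ∀ (limit : Int), Dom_gen_fibonacci limit → Spec_gen_fibonacci limit (gen_fibonacci limit)

-- ===== LEMMAS AND PROOFS =====

-- A's loop at state (second, next) produces one ":(" per element of B's fib list
-- started at (next, second + next).
theorem loopA_eq_map_fibs (first second next limit : Int)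
    (hs : 0 < second) (hn : 0 < next) :
    gen_fibonacci_loopA first second next limit hs hn
      = (gen_fibonacci_fibs next (second + next) limit hn (by omega)).map (fun _ => ":(") := by
  fun_induction gen_fibonacci_loopA first second next limit hs hn <;>
    (rw [gen_fibonacci_fibs]; split) <;> first | omega | simp_all

-- Unrolling B's list twice: fibs from (1,1) is 1 :: 1 :: fibs from (2,3) when they fit.
theorem fibs_unroll (limit : Int) :
    (gen_fibonacci_fibs 1 1 limit (by omega) (by omega)).drop 2
      = gen_fibonacci_fibs (1 + 1) (1 + (1 + 1)) limit (by omega) (by omega) := by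
  rw [gen_fibonacci_fibs]
  split
  · rw [gen_fibonacci_fibs]
    split
    · simp
    · omega
  · rw [gen_fibonacci_fibs]
    split
    · omega
    · simp

theorem gen_fibonacci_spec : Claim_equal_gen_fibonacci := by
  intro limit _
  show gen_fibonacci limit = gen_fibonacci_alt limit
  unfold gen_fibonacci gen_fibonacci_alt
  rw [loopA_eq_map_fibs, fibs_unroll]
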